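-- pv_equiv track=rewrite | github.com/xinbingzhe/tianchi_koubei | train_pre/train_union.py | create_weekend
-- ===== SOURCE A (Python) =====
-- def create_weekend(xweekend):
--     j = 3
--     for i in range(1,504):
--         if j == 6 or j ==7:
--             xweekend.append(1)
--             if j == 7:
--                 j = 1
--             else:
--                 j += 1
--         else:
--             xweekend.append(0)
--             j += 1
--     return xweekend
-- ===== SOURCE B (Python) =====
-- def create_weekend(xweekend):
--     base = [0, 0, 0, 1, 1, 0, 0]
--     for i in range(503):
--         xweekend.append(base[i % 7])
--     return xweekend
-- ===== Notes on version B (the rewrite author's own statement) =====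
-- stated objective: simpler
-- what changed: Replaces the stateful day-counter loop with wraparound branching by a table lookup base[i % 7] over a fixed period-7 weekend pattern.
import Mathlib
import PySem

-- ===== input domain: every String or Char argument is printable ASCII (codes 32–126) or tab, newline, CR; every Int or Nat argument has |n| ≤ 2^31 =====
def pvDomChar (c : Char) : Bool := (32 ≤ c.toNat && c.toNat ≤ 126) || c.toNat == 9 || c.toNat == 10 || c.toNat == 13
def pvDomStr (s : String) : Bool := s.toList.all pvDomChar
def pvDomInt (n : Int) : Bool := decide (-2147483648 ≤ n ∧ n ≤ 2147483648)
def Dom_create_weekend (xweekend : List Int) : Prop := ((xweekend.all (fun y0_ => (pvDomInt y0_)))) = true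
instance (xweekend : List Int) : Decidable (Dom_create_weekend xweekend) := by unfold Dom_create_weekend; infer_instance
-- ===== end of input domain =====

-- B replaces A's stateful day-counter loop by a fixed period-7 table lookup (objective: simpler).
-- Both Pythons mutate the argument list in place (append) and return it; the equivalence proved is about the returned value.

-- ===== PORT A =====
-- one iteration of A's for-loop body over the state (xweekend, j)
def pvStepA (st : List Int × Int) (_ : Int) : List Int × Int :=
  if st.2 == 6 || st.2 == 7 then
    (st.1 ++ [1], if st.2 == 7 then 1 else st.2 + 1)
  else
    (st.1 ++ [0], st.2 + 1)

def create_weekend (xweekend : List Int) : List Int :=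
  ((PySem.List.pyRange 1 504 1).foldl pvStepA (xweekend, 3)).1

-- ===== PORT B =====
def pvBase : List Int := [0, 0, 0, 1, 1, 0, 0]

-- base[i % 7] is always in range (0 ≤ i % 7 < 7), so pyGetD is exact here
def create_weekend_alt (xweekend : List Int) : List Int :=
  (PySem.List.pyRange 0 503 1).foldl
    (fun xs i => xs ++ [PySem.List.pyGetD pvBase (PySem.Int.mod i 7) 0]) xweekend

-- ===== PRECONDITION & SPEC =====
def Spec_create_weekend (xweekend : List Int) (out : List Int) : Prop := out = create_weekend_alt xweekend
instance (xweekend : List Int) (out : List Int) : Decidable (Spec_create_weekend xweekend out) := by unfold Spec_create_weekend; infer_instance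

-- ===== CLAIM (what is proved, stated in full; the proofs are below) =====
def Claim_equal_create_weekend : Prop := ∀ (xweekend : List Int), Dom_create_weekend xweekend → Spec_create_weekend xweekend (create_weekend xweekend)

-- ===== LEMMAS AND PROOFS =====

-- A's loop only appends: the accumulator factors out of the fold
theorem pvFoldA_shift (l : List Int) : ∀ (acc : List Int) (j : Int),
    l.foldl pvStepA (acc, j) = (acc ++ (l.foldl pvStepA ([], j)).1, (l.foldl pvStepA ([], j)).2) := by
  induction l with
  | nil => intro acc j; simp
  | cons a l ih =>
    intro acc j
    simp only [List.foldl_cons]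
    rw [ih (pvStepA (acc, j) a).1 (pvStepA (acc, j) a).2,
        ih (pvStepA ([], j) a).1 (pvStepA ([], j) a).2]
    unfold pvStepA
    split_ifs <;> simp

-- B's loop only appends: the accumulator factors out of the fold
theorem pvFoldB_shift (l : List Int) : ∀ (acc : List Int),
    l.foldl (fun xs i => xs ++ [PySem.List.pyGetD pvBase (PySem.Int.mod i 7) 0]) acc
      = acc ++ l.foldl (fun xs i => xs ++ [PySem.List.pyGetD pvBase (PySem.Int.mod i 7) 0]) [] := by
  induction l with
  | nil => intro acc; simp
  | cons a l ih =>
    intro acc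
    simp only [List.foldl_cons]
    rw [ih (acc ++ [PySem.List.pyGetD pvBase (PySem.Int.mod a 7) 0]),
        ih ([] ++ [PySem.List.pyGetD pvBase (PySem.Int.mod a 7) 0])]
    simp

theorem pvA_append (xs : List Int) : create_weekend xs = xs ++ create_weekend [] := by
  unfold create_weekend
  rw [pvFoldA_shift]

theorem pvB_append (xs : List Int) : create_weekend_alt xs = xs ++ create_weekend_alt [] := by
  unfold create_weekend_alt
  rw [pvFoldB_shift]

set_option maxRecDepth 100000 in
theorem pvNil_eq : create_weekend [] = create_weekend_alt [] := by decide

-- ===== VERDICT (by name: the statement is the Claim_ definition above) =====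
theorem create_weekend_spec : Claim_equal_create_weekend := by
  intro xs _
  unfold Spec_create_weekend
  rw [pvA_append, pvB_append, pvNil_eq]
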